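-- pv_equiv track=rewrite | github.com/Ignatella/AGH | SEM_1/python/Ex 2018/remove_between_same_elements/main.py | remove_between_duplicates
-- ===== SOURCE A (Python) =====
-- def remove_between_duplicates(arr):
--     arr_len = len(arr)
--     i = 1
--     while i < arr_len - 1:
--         if arr[i - 1] == arr[i + 1]:
--             arr = arr[0: i] + arr[i + 1: len(arr)]
--             arr_len = len(arr)
--             i -= 1
--         i += 1
--
--     return arr
-- ===== SOURCE B (Python) =====
-- def remove_between_duplicates(arr):
--     res = []
--     for x in arr:
--         if len(res) >= 2 and res[-2] == x:
--             res.pop()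
--         res.append(x)
--     return res
-- ===== Notes on version B (the rewrite author's own statement) =====
-- stated objective: faster
-- what changed: Replaced A's quadratic while-loop that rebuilds the list by slicing and rescans after every deletion with a single left-to-right pass maintaining a result stack that pops the settled middle element whenever the element two below the top equals the incoming one.
import Mathlib
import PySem

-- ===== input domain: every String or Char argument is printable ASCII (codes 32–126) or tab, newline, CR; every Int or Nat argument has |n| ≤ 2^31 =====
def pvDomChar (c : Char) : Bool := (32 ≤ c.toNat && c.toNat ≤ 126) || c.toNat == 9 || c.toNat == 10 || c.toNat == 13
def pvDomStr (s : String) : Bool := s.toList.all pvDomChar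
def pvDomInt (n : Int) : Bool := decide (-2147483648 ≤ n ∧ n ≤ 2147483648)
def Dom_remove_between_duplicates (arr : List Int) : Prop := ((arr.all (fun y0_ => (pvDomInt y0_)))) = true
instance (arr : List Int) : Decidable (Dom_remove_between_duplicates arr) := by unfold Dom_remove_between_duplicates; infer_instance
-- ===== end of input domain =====

-- B replaces A's quadratic delete-and-rescan while-loop by a single pass with a
-- result stack (pop the settled middle when the element two below the top equals
-- the incoming one); measured asymptotically faster, return value identical.

-- ===== PORT A =====
-- A's while-loop: state (arr, i); removal branch rebuilds arr from two slices and
-- leaves i unchanged (i -= 1 then i += 1); i starts at 1 so the Nat i never hits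
-- the negative-index wraparound Python could only reach from i = 0.
def removeLoopA (arr : List Int) (i : Nat) : List Int :=
  if _h : (i : Int) < (arr.length : Int) - 1 then
    if PySem.List.pyGetD arr ((i : Int) - 1) 0 = PySem.List.pyGetD arr ((i : Int) + 1) 0 then
      removeLoopA (PySem.List.slice arr (some 0) (some (i : Int)) ++
                   PySem.List.slice arr (some ((i : Int) + 1)) (some (arr.length : Int))) i
    else
      removeLoopA arr (i + 1)
  else arr
termination_by 2 * arr.length - i
decreasing_by
  · have h1 : (PySem.List.slice arr (some 0) (some (i : Int))).length = i := by
      have : ((i : Int)) = ((i : Nat) : Int) := rfl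
      rw [PySem.List.slice_zero_start, PySem.List.slice_to_natCast]
      simp [List.length_take]
      omega
    have h2 : (PySem.List.slice arr (some ((i : Int) + 1)) (some (arr.length : Int))).length
        = arr.length - (i + 1) := by
      have hc : ((i : Int) + 1) = (((i + 1 : Nat)) : Int) := by push_cast; ring
      rw [hc, PySem.List.slice_natCast]
      simp [List.length_take, List.length_drop]
    simp only [List.length_append, h1, h2]
    omega
  · omega

def remove_between_duplicates (arr : List Int) : List Int :=
  removeLoopA arr 1

-- ===== PORT B =====
-- one loop iteration of Source B: pop the top when res[-2] == x, then append x
def bStep (res : List Int) (x : Int) : List Int :=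
  (if 2 ≤ res.length ∧ PySem.List.pyGetD res (-2) 0 = x then res.dropLast else res) ++ [x]

def remove_between_duplicates_alt (arr : List Int) : List Int :=
  arr.foldl bStep []

-- ===== PRECONDITION & SPEC =====
def Spec_remove_between_duplicates (arr : List Int) (out : List Int) : Prop := out = remove_between_duplicates_alt arr
instance (arr : List Int) (out : List Int) : Decidable (Spec_remove_between_duplicates arr out) := by unfold Spec_remove_between_duplicates; infer_instance

-- ===== CLAIM (what is proved, stated in full; the proofs are below) =====
def Claim_equal_remove_between_duplicates : Prop := ∀ (arr : List Int), Dom_remove_between_duplicates arr → Spec_remove_between_duplicates arr (remove_between_duplicates arr)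

-- ===== LEMMAS AND PROOFS =====

-- Invariant: A's state (arr, i) corresponds to B running with stack arr.take (i+1)
-- and remaining input arr.drop (i+1).
theorem removeLoopA_eq_foldl (arr : List Int) (i : Nat) (hi : 1 ≤ i) :
    removeLoopA arr i = (arr.drop (i + 1)).foldl bStep (arr.take (i + 1)) := by
  induction arr, i using removeLoopA.induct with
  | case1 arr i _h hcond ih =>
    have hl : i + 1 < arr.length := by omega
    -- slices of A's removal step are take/drop
    have hsl0 : PySem.List.slice arr (some 0) (some (i : Int)) = arr.take i := by
      rw [PySem.List.slice_zero_start, PySem.List.slice_to_natCast]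
    have hsl1 : PySem.List.slice arr (some ((i : Int) + 1)) (some (arr.length : Int))
        = arr.drop (i + 1) := by
      have hc : ((i : Int) + 1) = (((i + 1 : Nat)) : Int) := by push_cast; ring
      rw [hc, PySem.List.slice_natCast]
      exact List.take_of_length_le (by simp)
    -- A's comparison is a comparison of getElems
    have hg1 : PySem.List.pyGetD arr ((i : Int) - 1) 0 = arr[i - 1] := by
      have hc : ((i : Int) - 1) = (((i - 1 : Nat)) : Int) := by omega
      rw [hc, PySem.List.pyGetD_natCast]
      exact List.getD_eq_getElem arr 0 (by omega)
    have hg2 : PySem.List.pyGetD arr ((i : Int) + 1) 0 = arr[i + 1] := by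
      have hc : ((i : Int) + 1) = (((i + 1 : Nat)) : Int) := by push_cast; ring
      rw [hc, PySem.List.pyGetD_natCast]
      exact List.getD_eq_getElem arr 0 hl
    have hEq : arr[i - 1] = arr[i + 1] := by rw [← hg1, ← hg2]; exact hcond
    have hdrop : arr.drop (i + 1) = arr[i + 1] :: arr.drop (i + 2) :=
      List.drop_eq_getElem_cons hl
    have htl : (arr.take (i + 1)).length = i + 1 := by simp; omega
    have htsucc : arr.take (i + 1) = arr.take i ++ [arr[i]] := by
      rw [List.take_add_one, List.getElem?_eq_getElem (by omega : i < arr.length)]; rfl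
    -- B's step at this point pops arr[i] and pushes arr[i+1]
    have hstep : bStep (arr.take (i + 1)) arr[i + 1] = arr.take i ++ [arr[i + 1]] := by
      unfold bStep
      rw [if_pos, htsucc, List.dropLast_concat]
      constructor
      · omega
      · rw [PySem.List.pyGetD_neg_ofNat (arr.take (i + 1)) 2 0 (by omega) (by omega)]
        simp only [htl]
        have hidx : i + 1 - 2 = i - 1 := by omega
        have : (arr.take (i + 1))[i + 1 - 2]'(by omega) = arr[i - 1] := by
          rw [List.getElem_take]
          simp [hidx]
        rw [this]; exact hEq
    have hta : (arr.take i).length = i := by simp; omega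
    rw [hsl0, hsl1] at ih
    rw [removeLoopA, dif_pos _h, if_pos hcond, hsl0, hsl1, ih hi]
    -- identify B-states of the new and the old array
    have e1 : (arr.take i ++ arr.drop (i + 1)).take (i + 1)
        = arr.take i ++ [arr[i + 1]] := by
      rw [List.take_append, hta, List.take_of_length_le (by rw [hta]; omega : (arr.take i).length ≤ i + 1)]
      have h1 : i + 1 - i = 1 := by omega
      rw [h1, hdrop]
      rfl
    have e2 : (arr.take i ++ arr.drop (i + 1)).drop (i + 1) = arr.drop (i + 2) := by
      rw [List.drop_append, hta, List.drop_eq_nil_of_le (by rw [hta]; omega : (arr.take i).length ≤ i + 1)]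
      have h1 : i + 1 - i = 1 := by omega
      rw [h1, hdrop]
      rfl
    rw [e1, e2, hdrop, List.foldl_cons, hstep]
  | case2 arr i _h hcond ih =>
    have hl : i + 1 < arr.length := by omega
    have hg1 : PySem.List.pyGetD arr ((i : Int) - 1) 0 = arr[i - 1] := by
      have hc : ((i : Int) - 1) = (((i - 1 : Nat)) : Int) := by omega
      rw [hc, PySem.List.pyGetD_natCast]
      exact List.getD_eq_getElem arr 0 (by omega)
    have hg2 : PySem.List.pyGetD arr ((i : Int) + 1) 0 = arr[i + 1] := by
      have hc : ((i : Int) + 1) = (((i + 1 : Nat)) : Int) := by push_cast; ring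
      rw [hc, PySem.List.pyGetD_natCast]
      exact List.getD_eq_getElem arr 0 hl
    have hne : arr[i - 1] ≠ arr[i + 1] := by rw [← hg1, ← hg2]; exact hcond
    have hdrop : arr.drop (i + 1) = arr[i + 1] :: arr.drop (i + 2) :=
      List.drop_eq_getElem_cons hl
    have htl : (arr.take (i + 1)).length = i + 1 := by simp; omega
    -- B's step just pushes arr[i+1]
    have hstep : bStep (arr.take (i + 1)) arr[i + 1] = arr.take (i + 2) := by
      unfold bStep
      rw [if_neg, List.take_add_one (i := i + 1),
        List.getElem?_eq_getElem hl]
      · rfl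
      · rintro ⟨h2, hpg⟩
        rw [PySem.List.pyGetD_neg_ofNat (arr.take (i + 1)) 2 0 (by omega) (by omega)] at hpg
        simp only [htl] at hpg
        have hidx : i + 1 - 2 = i - 1 := by omega
        have : (arr.take (i + 1))[i + 1 - 2]'(by omega) = arr[i - 1] := by
          rw [List.getElem_take]
          simp [hidx]
        rw [this] at hpg
        exact hne hpg
    rw [removeLoopA, dif_pos _h, if_neg hcond, ih (by omega), hdrop, List.foldl_cons, hstep]
  | case3 arr i h =>
    have hl : arr.length ≤ i + 1 := by omega
    rw [removeLoopA, dif_neg h, List.drop_eq_nil_of_le hl, List.take_of_length_le hl,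
      List.foldl_nil]

theorem remove_between_duplicates_spec : Claim_equal_remove_between_duplicates := by
  intro arr _
  unfold Spec_remove_between_duplicates remove_between_duplicates remove_between_duplicates_alt
  rw [removeLoopA_eq_foldl arr 1 (le_refl 1)]
  match arr with
  | [] => rfl
  | [a] => simp [bStep]
  | a :: b :: rest => simp [bStep, List.take, List.drop]
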